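-- pv_equiv track=rewrite | github.com/L0verde/DES_python3 | format_des.py | populate_table
-- ===== SOURCE A (Python) =====
-- def populate_table(message: str, key=False, decrypt=False) -> list:
--     blocks, table = [], []
--     byte_count = 0
--
--     if decrypt:
--         row = []
--         bit_count = 0
--         for bit in message:
--             row.append(int(bit))
--             bit_count = bit_count + 1
--
--             if bit_count == 8:
--                 table.append(row)
--                 row = []
--                 bit_count, byte_count = 0, byte_count+1
--
--             if byte_count == 8:
--                 blocks.append(table)
--                 table = []
--                 bit_count, byte_count = 0, 0
--     else:
--         for letter in message:
--             bits = ord(letter)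
--             formated_bits = f'{bits:08b}'
--             row = []
--
--             for bit in formated_bits:
--                 row.append(ord(bit) - 48)
--
--             table.append(row)
--             byte_count = byte_count + 1
--
--             if byte_count == 8 and not key:
--                 blocks.append(table)
--                 byte_count = 0
--                 table = []
--         if key:
--             return table
--
--     if byte_count != 0:
--         blocks.append(table)
--         pad = blocks[-1]
--         while(byte_count != 8):
--             row = [0] * 8
--             pad.append(row)
--             byte_count = byte_count + 1
--
--     return blocks
-- ===== SOURCE B (Python) =====
-- def _chunk(xs, k):
--     return [xs[i:i + k] for i in range(0, len(xs), k)]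
--
--
-- def populate_table(message: str, key=False, decrypt=False) -> list:
--     if decrypt:
--         bits = [int(b) for b in message]
--         rows = _chunk(bits[:len(bits) - len(bits) % 8], 8)
--     else:
--         rows = [[(ord(c) >> (7 - j)) & 1 for j in range(8)] for c in message]
--         if key:
--             return rows
--     blocks = _chunk(rows, 8)
--     if blocks and len(blocks[-1]) != 8:
--         blocks[-1] += [[0] * 8] * (8 - len(blocks[-1]))
--     return blocks
-- ===== Notes on version B (the rewrite author's own statement) =====
-- stated objective: simpler
-- what changed: Replaces A's single stateful pass with five counters/accumulators and a format-string bit extraction by a build-rows-then-chunk decomposition: rows are built directly by arithmetic bit extraction (or by truncating and chunking the bit list in decrypt mode), blocks are a generic 8-chunking of the row list, and only the final partial block is padded.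
-- outside the precondition, e.g. on populate_table('A', True, False): A returns [[0, 1, 0, 0, 0, 0, 0, 1]], B returns [[0, 1, 0, 0, 0, 0, 0, 1]]; on populate_table('ab', False, True): A raises ValueError, B raises ValueError
import Mathlib
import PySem

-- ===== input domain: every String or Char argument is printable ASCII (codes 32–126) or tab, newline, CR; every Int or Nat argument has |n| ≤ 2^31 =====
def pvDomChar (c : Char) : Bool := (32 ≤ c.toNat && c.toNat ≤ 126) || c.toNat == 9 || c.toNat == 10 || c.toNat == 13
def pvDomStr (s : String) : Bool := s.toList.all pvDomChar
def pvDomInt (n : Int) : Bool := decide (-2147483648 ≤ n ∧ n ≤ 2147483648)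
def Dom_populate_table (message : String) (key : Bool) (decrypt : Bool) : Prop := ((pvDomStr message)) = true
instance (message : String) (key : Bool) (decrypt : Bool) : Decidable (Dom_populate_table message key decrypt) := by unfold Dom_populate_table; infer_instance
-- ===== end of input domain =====

-- B rebuilds the same 8x8 DES blocks by a rows-then-chunk decomposition instead of A's
-- five-counter single pass; same cost, plainer structure (return value only; no mutation).

-- ===== PORT A =====

-- f'{n:08b}': binary digits of n, MSB first, zero-padded on the left to width 8.
-- Exact for every n (standard binary formatting by repeated div/mod, then padding).
-- structural fuel (first argument) only so the recursion is kernel-reducible;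
-- n itself is always enough fuel since n/2 < n
def pyBinCharsFuel : Nat → Nat → List Char
  | _, 0 => []
  | 0, _ + 1 => []
  | fuel + 1, n + 1 => pyBinCharsFuel fuel ((n + 1) / 2) ++ [if (n + 1) % 2 = 1 then '1' else '0']

def pyBinChars (n : Nat) : List Char := pyBinCharsFuel n n

def pyFormat08b (n : Nat) : List Char :=
  let s := if n = 0 then ['0'] else pyBinChars n
  List.replicate (8 - s.length) '0' ++ s

-- int(bit) for a single char: exact on digit characters '0'..'9' (Pre_ restricts decrypt
-- messages to digits; on other chars Python raises ValueError).
def pyIntDigit (c : Char) : Int := (c.toNat : Int) - 48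

-- the trailing 'while byte_count != 8: pad.append([0]*8)' loop; Python's guard is
-- 'byte_count != 8' and byte_count ≤ 8 always holds on entry, so '< 8' is the same test
-- (written this way only so that the recursion terminates on all inputs).
def padWhile (pad : List (List Int)) (byte_count : Nat) : List (List Int) :=
  if byte_count < 8 then padWhile (pad ++ [List.replicate 8 (0 : Int)]) (byte_count + 1) else pad
termination_by 8 - byte_count

-- the final 'if byte_count != 0' padding block shared by both of A's branches
def finishA (blocks : List (List (List Int))) (table : List (List Int)) (byte_count : Nat) :
    List (List (List Int)) :=
  if byte_count ≠ 0 then blocks ++ [padWhile table byte_count] else blocks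

-- loop body of A's decrypt branch; state = (blocks, table, row, bit_count, byte_count)
def stepDec (s : List (List (List Int)) × List (List Int) × List Int × Nat × Nat) (bit : Char) :
    List (List (List Int)) × List (List Int) × List Int × Nat × Nat :=
  let (blocks, table, row, bit_count, byte_count) := s
  let row := row ++ [pyIntDigit bit]
  let bit_count := bit_count + 1
  let (blocks, table, row, bit_count, byte_count) :=
    if bit_count = 8 then (blocks, table ++ [row], ([] : List Int), 0, byte_count + 1)
    else (blocks, table, row, bit_count, byte_count)
  if byte_count = 8 then (blocks ++ [table], ([] : List (List Int)), row, bit_count, 0)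
  else (blocks, table, row, bit_count, byte_count)

-- loop body of A's normal branch; state = (blocks, table, byte_count)
def stepEnc (key : Bool) (s : List (List (List Int)) × List (List Int) × Nat) (letter : Char) :
    List (List (List Int)) × List (List Int) × Nat :=
  let (blocks, table, byte_count) := s
  let bits := letter.toNat
  let formated_bits := pyFormat08b bits
  let row := formated_bits.map (fun bit => ((bit.toNat : Int) - 48))
  let table := table ++ [row]
  let byte_count := byte_count + 1
  if byte_count = 8 ∧ key = false then (blocks ++ [table], ([] : List (List Int)), 0)
  else (blocks, table, byte_count)

def populate_table (message : String) (key : Bool) (decrypt : Bool) : List (List (List Int)) :=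
  if decrypt then
    let st := message.toList.foldl stepDec ([], [], [], 0, 0)
    finishA st.1 st.2.1 st.2.2.2.2
  else
    let st := message.toList.foldl (stepEnc key) ([], [], 0)
    if key then
      -- Python returns 'table' here: a 2-D list, outside the declared 3-D return type;
      -- excluded by Pre_; represented as the single-element wrapping [table].
      [st.2.1]
    else
      finishA st.1 st.2.1 st.2.2

-- ===== PORT B =====

-- _chunk(xs, 8): successive slices of 8 elements (last one possibly shorter)
def chunk8 {α : Type} (xs : List α) : List (List α) :=
  if xs = [] then [] else xs.take 8 :: chunk8 (xs.drop 8)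
termination_by xs.length
decreasing_by
  rename_i h
  have : xs.length ≠ 0 := fun h0 => h (List.eq_nil_of_length_eq_zero h0)
  simp [List.length_drop]; omega

def rowOfChar (c : Char) : List Int :=
  (List.range 8).map (fun j => (((c.toNat >>> (7 - j)) &&& 1 : Nat) : Int))

def populate_table_alt (message : String) (key : Bool) (decrypt : Bool) : List (List (List Int)) :=
  let rows :=
    if decrypt then
      let bits := message.toList.map pyIntDigit   -- int(b), exact on digits (Pre_)
      -- bits[:len(bits) - len(bits) % 8], chunked into rows of 8
      chunk8 (bits.take (bits.length - bits.length % 8))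
    else
      message.toList.map rowOfChar
  if key = true ∧ decrypt = false then
    -- Python B returns 'rows' here (2-D, outside the declared type); excluded by Pre_;
    -- represented as the single-element wrapping [rows].
    [rows]
  else
    let blocks := chunk8 rows
    match blocks.getLast? with
    | none => blocks
    | some last =>
        if last.length ≠ 8 then
          blocks.dropLast ++ [last ++ List.replicate (8 - last.length) (List.replicate 8 (0 : Int))]
        else blocks

-- ===== PRECONDITION & SPEC =====
-- Pre_ excludes (a) decrypt messages containing a non-digit character, where Python A
-- raises ValueError (so does Python B), and (b) key = true with decrypt = false, where A
-- returns a 2-D list of bit rows — not a value of the declared 3-D block-list type.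
def Pre_populate_table (message : String) (key : Bool) (decrypt : Bool) : Prop :=
  (decrypt = true → message.toList.all (fun c => decide (48 ≤ c.toNat ∧ c.toNat ≤ 57)) = true) ∧
  (key = true → decrypt = true)
instance (message : String) (key : Bool) (decrypt : Bool) :
    Decidable (Pre_populate_table message key decrypt) := by
  unfold Pre_populate_table; infer_instance

def pvWitness_populate_table : String × Bool × Bool := ("Hello, DES!", false, false)

def Spec_populate_table (message : String) (key : Bool) (decrypt : Bool) (out : List (List (List Int))) : Prop := out = populate_table_alt message key decrypt
instance (message : String) (key : Bool) (decrypt : Bool) (out : List (List (List Int))) : Decidable (Spec_populate_table message key decrypt out) := by unfold Spec_populate_table; infer_instance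

-- ===== CLAIM (what is proved, stated in full; the proofs are below) =====
def Claim_equal_populate_table : Prop := ∀ (message : String) (key : Bool) (decrypt : Bool), Dom_populate_table message key decrypt → Pre_populate_table message key decrypt → Spec_populate_table message key decrypt (populate_table message key decrypt)

-- ===== LEMMAS AND PROOFS =====

-- complete 8-groups of a list, and the leftover (< 8 elements)
def fc {α : Type} (l : List α) : List (List α) :=
  if 8 ≤ l.length then l.take 8 :: fc (l.drop 8) else []
termination_by l.length
decreasing_by simp [List.length_drop]; omega

def lo {α : Type} (l : List α) : List α :=
  if 8 ≤ l.length then lo (l.drop 8) else l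
termination_by l.length
decreasing_by simp [List.length_drop]; omega

theorem fc_small {α : Type} (l : List α) (h : l.length < 8) : fc l = [] := by
  unfold fc; rw [if_neg (by omega)]

theorem lo_small {α : Type} (l : List α) (h : l.length < 8) : lo l = l := by
  unfold lo; rw [if_neg (by omega)]

theorem fc_append {α : Type} (r l : List α) (h : r.length = 8) : fc (r ++ l) = r :: fc l := by
  rw [fc, if_pos (by simp [h])]
  have ht : (r ++ l).take 8 = r := by rw [← h]; simp
  have hd : (r ++ l).drop 8 = l := by rw [← h]; simp
  rw [ht, hd]

theorem lo_append {α : Type} (r l : List α) (h : r.length = 8) : lo (r ++ l) = lo l := by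
  rw [lo, if_pos (by simp [h])]
  have hd : (r ++ l).drop 8 = l := by rw [← h]; simp
  rw [hd]

theorem lo_length_lt {α : Type} (l : List α) : (lo l).length < 8 := by
  fun_induction lo l with
  | case1 l h ih => exact ih
  | case2 l h => omega

theorem fc_mem_length {α : Type} (l : List α) (x : List α) (hx : x ∈ fc l) : x.length = 8 := by
  fun_induction fc l with
  | case1 l h ih =>
      rcases List.mem_cons.mp hx with h1 | h2
      · subst h1; simp [List.length_take]; omega
      · exact ih h2
  | case2 l h => simp at hx

theorem chunk8_eq {α : Type} (l : List α) :
    chunk8 l = fc l ++ (if lo l = [] then [] else [lo l]) := by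
  fun_induction chunk8 l with
  | case2 l hne ih =>
      by_cases h8 : 8 ≤ l.length
      · rw [fc, if_pos h8, lo, if_pos h8, ih]
        simp
      · have hdrop : l.drop 8 = [] := List.drop_eq_nil_of_le (by omega)
        have htake : l.take 8 = l := List.take_of_length_le (by omega)
        rw [fc_small _ (by omega), lo_small _ (by omega), hdrop, htake, chunk8, if_pos rfl,
          if_neg hne]
        simp
  | case1 =>
      rw [fc_small _ (by simp), lo_small _ (by simp)]
      simp

theorem padWhile_eq (pad : List (List Int)) (bc : Nat) :
    padWhile pad bc = pad ++ List.replicate (8 - bc) (List.replicate 8 (0 : Int)) := by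
  fun_induction padWhile pad bc with
  | case1 pad bc h ih =>
      rw [ih, show 8 - bc = (8 - (bc + 1)) + 1 by omega, List.replicate_succ]
      simp [List.replicate_succ]
  | case2 pad bc h =>
      rw [show 8 - bc = 0 by omega]
      simp

-- B's tail (chunk + pad-last) equals A's finishA on fc/lo of the same row list
theorem finishB_eq (rows : List (List Int)) :
    (let blocks := chunk8 rows
     match blocks.getLast? with
     | none => blocks
     | some last =>
         if last.length ≠ 8 then
           blocks.dropLast ++ [last ++ List.replicate (8 - last.length) (List.replicate 8 (0 : Int))]
         else blocks)
    = finishA (fc rows) (lo rows) (lo rows).length := by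
  simp only [chunk8_eq rows]
  by_cases hl : lo rows = []
  · rw [if_pos hl]
    unfold finishA
    rw [if_neg (by simp [hl])]
    simp only [List.append_nil]
    cases hgl : (fc rows).getLast? with
    | none => simp
    | some last =>
        have hmem : last ∈ fc rows := List.mem_of_getLast? hgl
        have h8 := fc_mem_length rows last hmem
        simp [h8]
  · have hlen : (lo rows).length ≠ 0 := by simpa [List.length_eq_zero_iff] using hl
    have hlt := lo_length_lt rows
    rw [if_neg hl]
    unfold finishA
    rw [if_pos hlen, padWhile_eq]
    rw [List.getLast?_concat]
    simp only [List.dropLast_concat]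
    rw [if_pos (by omega)]

-- truncating to a multiple of 8 and chunking = the complete 8-groups
theorem chunk8_trunc {α : Type} (l : List α) :
    chunk8 (l.take (l.length - l.length % 8)) = fc l := by
  by_cases h : 8 ≤ l.length
  · have h8 : l.length - l.length % 8 = 8 + ((l.drop 8).length - (l.drop 8).length % 8) := by
      simp only [List.length_drop]; omega
    have htl : (l.take 8).length = 8 := by simp; omega
    rw [h8, List.take_add, chunk8,
      if_neg (by simp only [← List.length_eq_zero_iff] at *; simp [htl]),
      List.take_append_of_le_length (by omega), List.take_of_length_le (by omega),
      List.drop_append_of_le_length (by omega), List.drop_of_length_le (by omega),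
      List.nil_append, fc, if_pos h, chunk8_trunc (l.drop 8)]
  · have hm : l.length % 8 = l.length := Nat.mod_eq_of_lt (by omega)
    rw [hm, Nat.sub_self, List.take_zero, chunk8, if_pos rfl, fc_small _ (by omega)]
termination_by l.length
decreasing_by simp [List.length_drop]; omega

theorem loopN (cs : List Char) (blocks : List (List (List Int))) (table : List (List Int))
    (h : table.length < 8) :
    cs.foldl (stepEnc false) (blocks, table, table.length)
      = (blocks ++ fc (table ++ cs.map (fun c => (pyFormat08b c.toNat).map (fun bit => ((bit.toNat : Int) - 48)))),
         lo (table ++ cs.map (fun c => (pyFormat08b c.toNat).map (fun bit => ((bit.toNat : Int) - 48)))),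
         (lo (table ++ cs.map (fun c => (pyFormat08b c.toNat).map (fun bit => ((bit.toNat : Int) - 48))))).length) := by
  induction cs generalizing blocks table with
  | nil =>
      simp only [List.map_nil, List.append_nil, List.foldl_nil]
      rw [fc_small _ h, lo_small _ h]
      simp
  | cons c cs ih =>
      simp only [List.foldl_cons, List.map_cons]
      set r := (pyFormat08b c.toNat).map (fun bit => ((bit.toNat : Int) - 48)) with hr
      by_cases h8 : table.length + 1 = 8
      · have hstep : stepEnc false (blocks, table, table.length) c
            = (blocks ++ [table ++ [r]], [], 0) := by
          simp [stepEnc, ← hr, h8]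
        rw [hstep]
        have h0 : (0 : Nat) = ([] : List (List Int)).length := by simp
        rw [h0, ih (blocks ++ [table ++ [r]]) [] (by simp)]
        have hsplit : table ++ r :: cs.map (fun c => (pyFormat08b c.toNat).map (fun bit => ((bit.toNat : Int) - 48)))
            = (table ++ [r]) ++ cs.map (fun c => (pyFormat08b c.toNat).map (fun bit => ((bit.toNat : Int) - 48))) := by
          simp
        have hlen8 : (table ++ [r]).length = 8 := by simp; omega
        rw [hsplit, fc_append _ _ hlen8, lo_append _ _ hlen8]
        simp
      · have hstep : stepEnc false (blocks, table, table.length) c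
            = (blocks, table ++ [r], (table ++ [r]).length) := by
          simp [stepEnc, ← hr, h8]
        rw [hstep, ih blocks (table ++ [r]) (by simp; omega)]
        simp

theorem loopD (cs : List Char) (blocks : List (List (List Int))) (table : List (List Int))
    (row : List Int) (hr : row.length < 8) (ht : table.length < 8) :
    cs.foldl stepDec (blocks, table, row, row.length, table.length)
      = (blocks ++ fc (table ++ fc (row ++ cs.map pyIntDigit)),
         lo (table ++ fc (row ++ cs.map pyIntDigit)),
         lo (row ++ cs.map pyIntDigit),
         (lo (row ++ cs.map pyIntDigit)).length,
         (lo (table ++ fc (row ++ cs.map pyIntDigit))).length) := by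
  induction cs generalizing blocks table row with
  | nil =>
      simp only [List.map_nil, List.append_nil, List.foldl_nil]
      rw [fc_small _ hr, List.append_nil, fc_small _ ht, lo_small _ ht, lo_small _ hr]
      simp
  | cons c cs ih =>
      simp only [List.foldl_cons, List.map_cons]
      by_cases h8 : row.length + 1 = 8
      · have hrow8 : (row ++ [pyIntDigit c]).length = 8 := by simp; omega
        have hsplit : row ++ pyIntDigit c :: cs.map pyIntDigit
            = (row ++ [pyIntDigit c]) ++ cs.map pyIntDigit := by simp
        by_cases h9 : table.length + 1 = 8
        · have hstep : stepDec (blocks, table, row, row.length, table.length) c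
              = (blocks ++ [table ++ [row ++ [pyIntDigit c]]], [], [], 0, 0) := by
            simp [stepDec, h8, h9]
          rw [hstep]
          have h0 : ((blocks ++ [table ++ [row ++ [pyIntDigit c]]], ([] : List (List Int)), ([] : List Int), 0, 0) : List (List (List Int)) × List (List Int) × List Int × Nat × Nat)
              = (blocks ++ [table ++ [row ++ [pyIntDigit c]]], [], [], ([] : List Int).length, ([] : List (List Int)).length) := by simp
          rw [h0, ih (blocks ++ [table ++ [row ++ [pyIntDigit c]]]) [] [] (by simp) (by simp)]
          have htab8 : (table ++ [row ++ [pyIntDigit c]]).length = 8 := by simp; omega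
          rw [hsplit, fc_append _ _ hrow8, lo_append _ _ hrow8]
          have hsplit2 : table ++ (row ++ [pyIntDigit c]) :: fc (cs.map pyIntDigit)
              = (table ++ [row ++ [pyIntDigit c]]) ++ fc (cs.map pyIntDigit) := by simp
          rw [hsplit2, fc_append _ _ htab8, lo_append _ _ htab8]
          simp
        · have hstep : stepDec (blocks, table, row, row.length, table.length) c
              = (blocks, table ++ [row ++ [pyIntDigit c]], [], 0, (table ++ [row ++ [pyIntDigit c]]).length) := by
            simp [stepDec, h8, h9]
          rw [hstep]
          have h0 : ((blocks, table ++ [row ++ [pyIntDigit c]], ([] : List Int), 0, (table ++ [row ++ [pyIntDigit c]]).length) : List (List (List Int)) × List (List Int) × List Int × Nat × Nat)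
              = (blocks, table ++ [row ++ [pyIntDigit c]], [], ([] : List Int).length, (table ++ [row ++ [pyIntDigit c]]).length) := by simp
          rw [h0, ih blocks (table ++ [row ++ [pyIntDigit c]]) [] (by simp) (by simp; omega)]
          rw [hsplit, fc_append _ _ hrow8, lo_append _ _ hrow8]
          simp
      · have hstep : stepDec (blocks, table, row, row.length, table.length) c
            = (blocks, table, row ++ [pyIntDigit c], (row ++ [pyIntDigit c]).length, table.length) := by
          simp [stepDec, h8]
          omega
        rw [hstep, ih blocks table (row ++ [pyIntDigit c]) (by simp; omega) ht]
        simp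

-- the format-string row equals the bit-extraction row, for every byte value
set_option maxRecDepth 10000 in
theorem row_eq_fin (n : Fin 256) :
    (pyFormat08b n.val).map (fun bit => ((bit.toNat : Int) - 48))
      = (List.range 8).map (fun j => (((n.val >>> (7 - j)) &&& 1 : Nat) : Int)) := by
  revert n; decide

theorem row_eq (c : Char) (h : c.toNat < 256) :
    (pyFormat08b c.toNat).map (fun bit => ((bit.toNat : Int) - 48)) = rowOfChar c := by
  have h2 := row_eq_fin ⟨c.toNat, h⟩
  simpa [rowOfChar] using h2

-- ===== VERDICT (by name: the statement is the Claim_ definition above) =====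
theorem dom_char_lt (message : String) (hdom : Dom_populate_table message false false)
    (c : Char) (hc : c ∈ message.toList) : c.toNat < 256 := by
  unfold Dom_populate_table pvDomStr at hdom
  rw [List.all_eq_true] at hdom
  have := hdom c hc
  simp [pvDomChar] at this
  omega

theorem populate_table_spec : Claim_equal_populate_table := by
  intro message key decrypt hdom hpre
  obtain ⟨hdigits, hkey⟩ := hpre
  unfold Spec_populate_table populate_table populate_table_alt
  by_cases hd : decrypt = true
  · subst hd
    simp only [Bool.true_eq_false, and_false, if_false, if_true]
    have hD := loopD message.toList [] [] [] (by simp) (by simp)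
    simp only [List.length_nil, List.nil_append] at hD
    rw [hD]
    rw [chunk8_trunc (message.toList.map pyIntDigit)]
    exact (finishB_eq (fc (message.toList.map pyIntDigit))).symm
  · have hd' : decrypt = false := by cases decrypt <;> simp_all
    subst hd'
    have hk' : key = false := by
      cases key
      · rfl
      · exact absurd (hkey rfl) (by simp)
    subst hk'
    simp only [Bool.false_eq_true, false_and, if_false]
    have hmap : message.toList.map (fun c => (pyFormat08b c.toNat).map (fun bit => ((bit.toNat : Int) - 48)))
        = message.toList.map rowOfChar := by
      apply List.map_congr_left
      intro c hc
      exact row_eq c (dom_char_lt message hdom c hc)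
    have hN := loopN message.toList [] [] (by simp)
    simp only [List.length_nil, List.nil_append] at hN
    rw [hN, hmap]
    exact (finishB_eq (message.toList.map rowOfChar)).symm
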